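-- pv_equiv track=rewrite | github.com/AndrewSiwi/Online_judge | 10196.py | check
-- ===== SOURCE A (Python) =====
-- def check(chessboard, move_coordinates, enemy_king):
--     directions = { "none": True,
--                    "right": True, "left": True, "down": True, "up": True,
--                    "down_right": True, "down_left": True, "up_right": True, "up_left": True }
--
--     for m_c in move_coordinates:
--         r = m_c[0]
--         c = m_c[1]
--         direction = m_c[2]
--         if directions[direction] and is_in_chessboard(r, c):
--             if chessboard[r][c] == enemy_king:
--                 return True
--             elif chessboard[r][c] != ".":
--                 directions[direction] = False
--             directions["none"] = True
--
--     return False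
--
-- def is_in_chessboard(i, j):
--     ret = i < 8 and i > -1 and j < 8 and j > -1
--     return ret
-- ===== SOURCE B (Python) =====
-- DIRECTIONS = ("none", "right", "left", "down", "up",
--               "down_right", "down_left", "up_right", "up_left")
--
--
-- def check(chessboard, move_coordinates, enemy_king):
--     # group the moves by direction tag (KeyError on an unknown tag, like A's dict lookup)
--     rays = {d: [] for d in DIRECTIONS}
--     for m in move_coordinates:
--         rays[m[2]].append((m[0], m[1]))
--     # scan each direction's ray independently; a "none" ray is never blocked
--     for d, squares in rays.items():
--         for r, c in squares:
--             if 0 <= r < 8 and 0 <= c < 8: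
--                 piece = chessboard[r][c]
--                 if piece == enemy_king:
--                     return True
--                 if piece != "." and d != "none":
--                     break
--     return False
-- ===== Notes on version B (the rewrite author's own statement) =====
-- stated objective: alternative
-- what changed: B first partitions the moves by direction tag into a pre-initialized dict of rays and then scans each direction's ray independently with a break at the first blocker, instead of A's single pass over the interleaved moves that maintains a mutable per-direction alive-flag table.
-- outside the precondition, e.g. on check([['k']], [(0, 0, 'up'), (0, 0, 'bogus')], 'k'): A returns True, B raises KeyError; on check([['k']], [(0, 0, 'up'), (5, 5, 'right')], 'k'): A returns True, B raises IndexError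
import Mathlib
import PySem

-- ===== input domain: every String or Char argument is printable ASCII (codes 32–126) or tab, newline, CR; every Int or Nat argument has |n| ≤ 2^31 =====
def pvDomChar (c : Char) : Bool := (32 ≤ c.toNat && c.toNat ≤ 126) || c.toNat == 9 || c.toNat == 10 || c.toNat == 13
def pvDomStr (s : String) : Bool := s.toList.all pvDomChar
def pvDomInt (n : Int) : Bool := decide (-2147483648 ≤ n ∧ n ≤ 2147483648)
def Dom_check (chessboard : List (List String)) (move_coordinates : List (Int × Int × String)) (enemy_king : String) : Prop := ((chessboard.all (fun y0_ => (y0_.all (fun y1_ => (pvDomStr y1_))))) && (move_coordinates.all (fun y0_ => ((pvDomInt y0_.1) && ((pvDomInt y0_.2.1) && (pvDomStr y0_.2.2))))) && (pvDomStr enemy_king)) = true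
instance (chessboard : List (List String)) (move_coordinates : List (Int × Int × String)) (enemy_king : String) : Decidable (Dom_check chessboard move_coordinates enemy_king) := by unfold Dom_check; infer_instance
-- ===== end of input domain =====

-- B groups the moves by direction into rays scanned independently instead of A's
-- one pass with a mutable per-direction flag table; same cost, different decomposition.

-- shared helpers: the fixed direction names and the board access chessboard[r][c]
def pvValidDirs : List String :=
  ["none", "right", "left", "down", "up", "down_right", "down_left", "up_right", "up_left"]

-- chessboard[r][c]; the .getD defaults are reached only outside Pre_check (Python raises IndexError there)
def pvBoardAt (chessboard : List (List String)) (r c : Int) : String :=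
  ((PySem.List.pyGet? ((PySem.List.pyGet? chessboard r).getD [])) c).getD ""

-- ===== PORT A =====
def pvIsInChessboard (i j : Int) : Bool :=
  decide (i < 8) && decide (i > -1) && decide (j < 8) && decide (j > -1)

-- directions[d] is read as getD … false; outside Pre_check Python raises KeyError instead
def pvCheckLoop (chessboard : List (List String)) (enemy_king : String) :
    List (Int × Int × String) → PySem.Dict String Bool → Bool
  | [], _ => false
  | (r, c, direction) :: rest, dirs =>
    if dirs.getD direction false && pvIsInChessboard r c then
      if pvBoardAt chessboard r c == enemy_king then true
      else
        let dirs1 := if pvBoardAt chessboard r c != "." then dirs.insert direction false else dirs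
        pvCheckLoop chessboard enemy_king rest (dirs1.insert "none" true)
    else pvCheckLoop chessboard enemy_king rest dirs

def pvInitDirs : PySem.Dict String Bool :=
  pvValidDirs.foldl (fun d k => d.insert k true) PySem.Dict.empty

def check (chessboard : List (List String)) (move_coordinates : List (Int × Int × String)) (enemy_king : String) : Bool :=
  pvCheckLoop chessboard enemy_king move_coordinates pvInitDirs

-- ===== PORT B =====
def pvRayScan (chessboard : List (List String)) (enemy_king : String) (d : String) :
    List (Int × Int) → Bool
  | [] => false
  | (r, c) :: rest =>
    if decide (0 ≤ r) && decide (r < 8) && decide (0 ≤ c) && decide (c < 8) then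
      let piece := pvBoardAt chessboard r c
      if piece == enemy_king then true
      else if piece != "." && d != "none" then false   -- break
      else pvRayScan chessboard enemy_king d rest
    else pvRayScan chessboard enemy_king d rest

-- rays = {d: [] for d in DIRECTIONS}
def pvInitRays : PySem.Dict String (List (Int × Int)) :=
  pvValidDirs.foldl (fun g k => g.insert k []) PySem.Dict.empty

-- rays[m[2]].append((m[0], m[1])); Dict.modify matches Python's rays[d].append on every
-- key present in the dict — i.e. on all of Pre_check (Python raises KeyError on a fresh key)
def check_alt (chessboard : List (List String)) (move_coordinates : List (Int × Int × String)) (enemy_king : String) : Bool :=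
  let rays := (move_coordinates.map (fun m => (m.2.2, (m.1, m.2.1)))).foldl
      (fun g p => g.modify p.1 [] (· ++ [p.2])) pvInitRays
  rays.items.any (fun p => pvRayScan chessboard enemy_king p.1 p.2)

-- ===== PRECONDITION & SPEC =====
-- Pre_check excludes the inputs on which A raises: a move whose direction tag is not one of the
-- nine valid names (KeyError) or an in-board move whose square the given chessboard cannot index
-- (IndexError).  Because A may return True before reaching such a move, Pre_ also excludes a few
-- inputs on which A returns (see the cites in claim.json); B raises there too, only earlier.
def Pre_check (chessboard : List (List String)) (move_coordinates : List (Int × Int × String)) (_enemy_king : String) : Prop :=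
  ∀ m ∈ move_coordinates, m.2.2 ∈ pvValidDirs ∧
    (0 ≤ m.1 ∧ m.1 < 8 ∧ 0 ≤ m.2.1 ∧ m.2.1 < 8 →
      m.1 < (chessboard.length : Int) ∧
      m.2.1 < (((PySem.List.pyGet? chessboard m.1).getD []).length : Int))
instance (chessboard : List (List String)) (move_coordinates : List (Int × Int × String)) (enemy_king : String) : Decidable (Pre_check chessboard move_coordinates enemy_king) := by unfold Pre_check; infer_instance

def pvWitness_check : List (List String) × (List (Int × Int × String)) × String :=
  ([["."]], [((0 : Int), (0 : Int), "up")], "k")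

def Spec_check (chessboard : List (List String)) (move_coordinates : List (Int × Int × String)) (enemy_king : String) (out : Bool) : Prop := out = check_alt chessboard move_coordinates enemy_king
instance (chessboard : List (List String)) (move_coordinates : List (Int × Int × String)) (enemy_king : String) (out : Bool) : Decidable (Spec_check chessboard move_coordinates enemy_king out) := by unfold Spec_check; infer_instance

-- ===== CLAIM (what is proved, stated in full; the proofs are below) =====
def Claim_equal_check : Prop := ∀ (chessboard : List (List String)) (move_coordinates : List (Int × Int × String)) (enemy_king : String), Dom_check chessboard move_coordinates enemy_king → Pre_check chessboard move_coordinates enemy_king → Spec_check chessboard move_coordinates enemy_king (check chessboard move_coordinates enemy_king)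

-- ===== LEMMAS AND PROOFS =====

-- the squares of the moves carrying tag d, in input order
def pvProj (d : String) (mc : List (Int × Int × String)) : List (Int × Int) :=
  (mc.filter (fun m => m.2.2 == d)).map (fun m => (m.1, m.2.1))

-- A's per-direction behaviour, abstracted from the flag table: alive is direction d's flag;
-- a blocker kills the flag unless d = "none" (A immediately resets directions["none"] to True)
def pvRayA (chessboard : List (List String)) (enemy_king : String) (d : String) :
    Bool → List (Int × Int) → Bool
  | _, [] => false
  | alive, (r, c) :: rest =>
    if alive && pvIsInChessboard r c then
      if pvBoardAt chessboard r c == enemy_king then true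
      else pvRayA chessboard enemy_king d
        (if pvBoardAt chessboard r c != "." then (d == "none") else alive) rest
    else pvRayA chessboard enemy_king d alive rest

lemma pvInB_iff (i j : Int) :
    pvIsInChessboard i j = true ↔ 0 ≤ i ∧ i < 8 ∧ 0 ≤ j ∧ j < 8 := by
  simp [pvIsInChessboard]
  omega

lemma pvRayA_dead (cb : List (List String)) (ek d : String) (_hd : d ≠ "none") :
    ∀ sq, pvRayA cb ek d false sq = false := by
  intro sq
  induction sq with
  | nil => simp [pvRayA]
  | cons x rest ih => obtain ⟨r, c⟩ := x; simp [pvRayA, ih]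

lemma pvRayScan_eq_rayA (cb : List (List String)) (ek d : String) :
    ∀ sq, pvRayScan cb ek d sq = pvRayA cb ek d true sq := by
  intro sq
  induction sq with
  | nil => rfl
  | cons x rest ih =>
    obtain ⟨r, c⟩ := x
    by_cases hin : 0 ≤ r ∧ r < 8 ∧ 0 ≤ c ∧ c < 8
    · have hin' : pvIsInChessboard r c = true := (pvInB_iff r c).mpr hin
      by_cases hk : (pvBoardAt cb r c == ek) = true
      · simp [pvRayScan, pvRayA, hin', hk, hin.1, hin.2.1, hin.2.2.1, hin.2.2.2]
      · by_cases hb : pvBoardAt cb r c = "."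
        · simp [pvRayScan, pvRayA, hin', hb, ih, hin.1, hin.2.1, hin.2.2.1, hin.2.2.2]
        · by_cases hnone : d = "none"
          · subst hnone
            simp [pvRayScan, pvRayA, hin', hb, ih, hin.1, hin.2.1, hin.2.2.1, hin.2.2.2]
          · have hfalse : (d == "none") = false := by simp [hnone]
            simp [pvRayScan, pvRayA, hin', hk, hb, hnone, hfalse,
              pvRayA_dead cb ek d hnone, hin.1, hin.2.1, hin.2.2.1, hin.2.2.2]
    · have hin' : pvIsInChessboard r c = false := by
        rcases Bool.eq_false_or_eq_true (pvIsInChessboard r c) with h | h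
        · exact absurd ((pvInB_iff r c).mp h) hin
        · exact h
      have hor : ¬ (0 ≤ r) ∨ ¬ (r < 8) ∨ ¬ (0 ≤ c) ∨ ¬ (c < 8) := by omega
      rcases hor with h | h | h | h <;>
        simp [pvRayScan, pvRayA, hin', h, ih]

lemma pvProj_cons (d : String) (r c : Int) (t : String) (rest : List (Int × Int × String)) :
    pvProj d ((r, c, t) :: rest) =
      if t = d then (r, c) :: pvProj d rest else pvProj d rest := by
  by_cases h : t = d <;> simp [pvProj, h]

lemma pvLoopA_eq (cb : List (List String)) (ek : String) :
    ∀ (mc : List (Int × Int × String)) (dirs : PySem.Dict String Bool),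
      dirs.getD "none" false = true →
      (∀ m ∈ mc, m.2.2 ∈ pvValidDirs) →
      pvCheckLoop cb ek mc dirs =
        pvValidDirs.any (fun d => pvRayA cb ek d (dirs.getD d false) (pvProj d mc)) := by
  intro mc
  induction mc with
  | nil => intro dirs _ _; simp [pvCheckLoop, pvProj, pvRayA]
  | cons m rest ih =>
    obtain ⟨r, c, t⟩ := m
    intro dirs hnone htags
    have ht : t ∈ pvValidDirs := htags _ (List.mem_cons_self ..)
    have htrest : ∀ m ∈ rest, m.2.2 ∈ pvValidDirs := fun m hm => htags m (List.mem_cons_of_mem _ hm)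
    by_cases hc : (dirs.getD t false && pvIsInChessboard r c) = true
    · have hflag : dirs.getD t false = true := (Bool.and_eq_true ..).mp hc |>.1
      have hin : pvIsInChessboard r c = true := (Bool.and_eq_true ..).mp hc |>.2
      by_cases hk : (pvBoardAt cb r c == ek) = true
      · -- A returns True; the d = t term of the any is true
        have hL : pvCheckLoop cb ek ((r, c, t) :: rest) dirs = true := by
          simp [pvCheckLoop, hc, hk]
        rw [hL]
        have : pvRayA cb ek t (dirs.getD t false) (pvProj t ((r, c, t) :: rest)) = true := by
          rw [pvProj_cons]
          simp [pvRayA, hflag, hin, hk]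
        exact (List.any_eq_true.mpr ⟨t, ht, this⟩).symm
      · -- step: the flag table is updated; every other direction's term is unchanged
        have hL : pvCheckLoop cb ek ((r, c, t) :: rest) dirs =
            pvCheckLoop cb ek rest
              ((if pvBoardAt cb r c != "." then dirs.insert t false else dirs).insert "none" true) := by
          simp [pvCheckLoop, hc, hk]
        rw [hL]
        set dirs1 := if pvBoardAt cb r c != "." then dirs.insert t false else dirs with hdirs1
        have hnone' : (dirs1.insert "none" true).getD "none" false = true :=
          PySem.Dict.getD_insert_self ..
        rw [ih (dirs1.insert "none" true) hnone' htrest]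
        apply PySem.List.any_congr_mem
        intro d _
        have hgd : (dirs1.insert "none" true).getD d false =
            if d = "none" then true else dirs1.getD d false := PySem.Dict.getD_insert ..
        rw [pvProj_cons]
        by_cases hdt : t = d
        · subst hdt
          by_cases hb : (pvBoardAt cb r c != ".") = true
          · have hg1 : dirs1.getD t false = false := by
              rw [hdirs1, if_pos hb]; exact PySem.Dict.getD_insert_self ..
            by_cases hn : t = "none"
            · simp [pvRayA, hin, hk, hb, hn, hnone]
            · have hfalse : (t == "none") = false := by simp [hn]
              simp [pvRayA, hflag, hin, hk, hb, hgd, hn, hg1, hfalse]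
          · have hg1 : dirs1.getD t false = true := by rw [hdirs1, if_neg hb]; exact hflag
            by_cases hn : t = "none"
            · simp [pvRayA, hin, hk, hb, hn, hnone]
            · have hfalse : (t == "none") = false := by simp [hn]
              simp [pvRayA, hflag, hin, hk, hb, hgd, hn, hg1]
        · have hg1 : dirs1.getD d false = dirs.getD d false := by
            rw [hdirs1]
            by_cases hb : (pvBoardAt cb r c != ".") = true
            · rw [if_pos hb, PySem.Dict.getD_insert, if_neg (fun h => hdt h.symm)]
            · rw [if_neg hb]
          by_cases hn : d = "none"
          · rw [hgd, if_pos hn, if_neg hdt, hn, hnone]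
          · rw [hgd, if_neg hn, hg1, if_neg hdt]
    · -- the move is skipped (dead flag or off the board)
      have hL : pvCheckLoop cb ek ((r, c, t) :: rest) dirs = pvCheckLoop cb ek rest dirs := by
        simp only [pvCheckLoop]
        rw [if_neg (by simpa using hc)]
      rw [hL, ih dirs hnone htrest]
      apply PySem.List.any_congr_mem
      intro d _
      rw [pvProj_cons]
      by_cases hdt : t = d
      · subst hdt
        have : (dirs.getD t false && pvIsInChessboard r c) = false := by
          simpa using hc
        simp [pvRayA, this]
      · rw [if_neg hdt]

lemma pvInitDirs_getD (d : String) (hd : d ∈ pvValidDirs) : pvInitDirs.getD d false = true := by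
  simp [pvValidDirs] at hd
  rcases hd with rfl | rfl | rfl | rfl | rfl | rfl | rfl | rfl | rfl <;> rfl

lemma pvInitRays_getD (d : String) : pvInitRays.getD d [] = [] := by
  cases h : pvInitRays.get? d with
  | none => simp [PySem.Dict.getD_eq_get?_getD, h]
  | some v =>
    have hm := PySem.Dict.mem_items_of_get?_eq_some pvInitRays h
    have hitems : pvInitRays.items =
        [("none", []), ("right", []), ("left", []), ("down", []), ("up", []),
         ("down_right", []), ("down_left", []), ("up_right", []), ("up_left", [])] := rfl
    rw [hitems] at hm
    have hv : v = [] := by simp at hm; tauto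
    simp [PySem.Dict.getD_eq_get?_getD, h, hv]

lemma pvUpdate_valid (tags : List String) (hsub : ∀ x ∈ tags, x ∈ pvValidDirs) :
    PySem.Set.update pvValidDirs tags = pvValidDirs := by
  rw [PySem.Set.update_eq_append_filter]
  have hnil : ((PySem.Set.ofList tags).filter
      (fun y => !(PySem.Set.contains pvValidDirs y))) = [] := by
    apply List.filter_eq_nil_iff.mpr
    intro y hy
    have hyt : y ∈ tags := (PySem.Set.mem_ofList _ _).mp hy
    simp [hsub y hyt]
  rw [hnil, List.append_nil]

lemma pvRays_items (mc : List (Int × Int × String)) (htags : ∀ m ∈ mc, m.2.2 ∈ pvValidDirs) :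
    ((mc.map (fun m => (m.2.2, (m.1, m.2.1)))).foldl
        (fun g p => g.modify p.1 [] (· ++ [p.2])) pvInitRays).items =
      pvValidDirs.map (fun d => (d, pvProj d mc)) := by
  set l := mc.map (fun m => (m.2.2, (m.1, m.2.1))) with hl
  set rays := l.foldl (fun g p => g.modify p.1 [] (· ++ [p.2])) pvInitRays with hrays
  have hkeys0 : pvInitRays.keys = pvValidDirs := rfl
  have hkeys : rays.keys = pvValidDirs := by
    rw [hrays, PySem.Dict.keys_foldl_modify_key, hkeys0]
    apply pvUpdate_valid
    intro x hx
    rw [hl] at hx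
    simp only [List.map_map, List.mem_map, Function.comp] at hx
    obtain ⟨m, hm, rfl⟩ := hx
    exact htags m hm
  have hnodup : rays.keys.Nodup := by rw [hkeys]; decide
  rw [PySem.Dict.items_eq_map_keys rays hnodup ([] : List (Int × Int)), hkeys]
  apply List.map_congr_left
  intro d _
  have hg : rays.getD d [] = pvInitRays.getD d [] ++ (l.filter (fun p => p.1 == d)).map (·.2) :=
    PySem.Dict.getD_foldl_modify_append ..
  rw [hg, pvInitRays_getD, List.nil_append, hl]
  simp [pvProj, List.filter_map, List.map_map, Function.comp_def]

theorem check_spec : Claim_equal_check := by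
  intro cb mc ek _ hpre
  have htags : ∀ m ∈ mc, m.2.2 ∈ pvValidDirs := fun m hm => (hpre m hm).1
  show check cb mc ek = check_alt cb mc ek
  have hA : check cb mc ek = pvValidDirs.any (fun d => pvRayA cb ek d true (pvProj d mc)) := by
    unfold check
    rw [pvLoopA_eq cb ek mc pvInitDirs rfl htags]
    apply PySem.List.any_congr_mem
    intro d hd
    rw [pvInitDirs_getD d hd]
  have hB : check_alt cb mc ek = pvValidDirs.any (fun d => pvRayScan cb ek d (pvProj d mc)) := by
    have hdef : check_alt cb mc ek =
        ((mc.map (fun m => (m.2.2, (m.1, m.2.1)))).foldl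
            (fun g p => g.modify p.1 [] (· ++ [p.2])) pvInitRays).items.any
          (fun p => pvRayScan cb ek p.1 p.2) := rfl
    rw [hdef, pvRays_items mc htags, List.any_map]
    apply PySem.List.any_congr_mem
    intro d _
    rfl
  rw [hA, hB]
  apply PySem.List.any_congr_mem
  intro d _
  rw [pvRayScan_eq_rayA]
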